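-- pv_equiv track=rewrite | github.com/kadoney/card-catalog | scripts/generate_clean_sql.py | parse_sql_row
-- ===== SOURCE A (Python) =====
-- def parse_sql_row(row_text):
--     """Parse a single SQL row using regex to extract field values."""
--     # This is tricky because we need to handle nested quotes, arrays, etc.
--     # We'll use a state machine approach
--
--     row_text = row_text.strip('(),').strip()
--     fields = []
--     current_field = ""
--     in_quotes = False
--     in_array = False
--     brace_depth = 0
--     escape_next = False
--
--     for i, char in enumerate(row_text):
--         if escape_next:
--             current_field += char
--             escape_next = False
--             continue
--
--         if char == '\\':
--             current_field += char
--             escape_next = True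
--             continue
--
--         if char == "'" and (i == 0 or row_text[i-1] != "'"):
--             in_quotes = not in_quotes
--             current_field += char
--         elif not in_quotes and char == '[':
--             in_array = True
--             current_field += char
--         elif not in_quotes and char == ']':
--             in_array = False
--             current_field += char
--         elif not in_quotes and not in_array and char == ',':
--             fields.append(current_field.strip())
--             current_field = ""
--         else:
--             current_field += char
--
--     if current_field.strip():
--         fields.append(current_field.strip())
--
--     return fields
-- ===== SOURCE B (Python) =====
-- def parse_sql_row(row_text):
--     """Parse a single SQL row: find top-level comma positions, then slice."""
--     s = row_text.strip('(),').strip()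
--     # phase 1: positions of top-level commas, tracking the previous character
--     cuts = []
--     in_quotes = False
--     in_array = False
--     escape_next = False
--     prev = None
--     i = 0
--     for ch in s:
--         if escape_next:
--             escape_next = False
--         elif ch == '\\':
--             escape_next = True
--         elif ch == "'" and prev != "'":
--             in_quotes = not in_quotes
--         elif not in_quotes and ch == '[':
--             in_array = True
--         elif not in_quotes and ch == ']':
--             in_array = False
--         elif not in_quotes and not in_array and ch == ',':
--             cuts.append(i)
--         prev = ch
--         i += 1
--     # phase 2: stripped slices between consecutive cut positions
--     fields = []
--     start = 0
--     for c in cuts: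
--         fields.append(s[start:c].strip())
--         start = c + 1
--     last = s[start:].strip()
--     if last:
--         fields.append(last)
--     return fields
-- ===== Notes on version B (the rewrite author's own statement) =====
-- stated objective: alternative
-- what changed: B never accumulates a field character by character: a first pass only records the positions of top-level commas, testing the quote look-back against a previous-character register instead of indexing the string, and a second pass emits the fields as stripped slices between consecutive cut positions.
import Mathlib
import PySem

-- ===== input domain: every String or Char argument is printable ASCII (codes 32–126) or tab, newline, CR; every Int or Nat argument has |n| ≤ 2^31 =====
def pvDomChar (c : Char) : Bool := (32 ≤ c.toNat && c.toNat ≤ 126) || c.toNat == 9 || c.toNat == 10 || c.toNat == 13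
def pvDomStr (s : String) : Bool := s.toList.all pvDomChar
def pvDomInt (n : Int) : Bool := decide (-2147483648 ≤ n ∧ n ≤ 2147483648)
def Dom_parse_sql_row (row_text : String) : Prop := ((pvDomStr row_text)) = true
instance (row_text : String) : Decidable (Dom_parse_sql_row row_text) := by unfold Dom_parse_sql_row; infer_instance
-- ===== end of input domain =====

-- B replaces A's character-by-character field accumulation by a pass recording top-level
-- comma positions (quote look-back via a previous-character register) and a second pass
-- of stripped slices between cuts (objective: alternative).

-- ===== PORT A =====
-- loop body of A: state (fields, current_field, in_quotes, in_array, escape_next)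
def pvStepA (cs : List Char)
    (st : List String × List Char × Bool × Bool × Bool) (p : Int × Char) :
    List String × List Char × Bool × Bool × Bool :=
  let (fields, cur, q, ar, esc) := st
  let i := p.1
  let c := p.2
  if esc = true then (fields, cur ++ [c], q, ar, false)
  else if c = '\\' then (fields, cur ++ [c], q, ar, true)
  else if c = '\'' ∧ (i = 0 ∨ PySem.List.pyGet? cs (i - 1) ≠ some '\'') then
    (fields, cur ++ [c], !q, ar, esc)
  else if q = false ∧ c = '[' then (fields, cur ++ [c], q, true, esc)
  else if q = false ∧ c = ']' then (fields, cur ++ [c], q, false, esc)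
  else if q = false ∧ ar = false ∧ c = ',' then
    (fields ++ [String.ofList (PySem.Chars.strip cur)], [], q, ar, esc)
  else (fields, cur ++ [c], q, ar, esc)

-- A's code after the loop: append the stripped current field if non-empty
def pvFinishA (st : List String × List Char × Bool × Bool × Bool) : List String :=
  if PySem.Chars.strip st.2.1 ≠ [] then st.1 ++ [String.ofList (PySem.Chars.strip st.2.1)]
  else st.1

def parse_sql_row (row_text : String) : List String :=
  let cs := (PySem.Str.strip (PySem.Str.stripChars row_text "(),")).toList
  pvFinishA ((PySem.List.enumerate cs 0).foldl (pvStepA cs) ([], [], false, false, false))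

-- ===== PORT B =====
-- B's first pass: walk the characters once, carrying the counter i, the previous
-- character and the three state flags, and emit the top-level comma positions
def pvCuts (i : Int) (prev : Option Char) (q ar esc : Bool) : List Char → List Int
  | [] => []
  | c :: rest =>
    if esc = true then pvCuts (i + 1) (some c) q ar false rest
    else if c = '\\' then pvCuts (i + 1) (some c) q ar true rest
    else if c = '\'' ∧ prev ≠ some '\'' then pvCuts (i + 1) (some c) (!q) ar esc rest
    else if q = false ∧ c = '[' then pvCuts (i + 1) (some c) q true esc rest
    else if q = false ∧ c = ']' then pvCuts (i + 1) (some c) q false esc rest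
    else if q = false ∧ ar = false ∧ c = ',' then i :: pvCuts (i + 1) (some c) q ar esc rest
    else pvCuts (i + 1) (some c) q ar esc rest

-- B's second pass: the stripped slice before each cut, then the trailing slice if non-empty
def pvFields (cs : List Char) (start : Int) : List Int → List String
  | [] =>
    let last := PySem.Chars.strip (PySem.List.slice cs (some start) none)
    if last ≠ [] then [String.ofList last] else []
  | c :: rest =>
    String.ofList (PySem.Chars.strip (PySem.List.slice cs (some start) (some c)))
      :: pvFields cs (c + 1) rest

def parse_sql_row_alt (row_text : String) : List String :=
  let cs := (PySem.Str.strip (PySem.Str.stripChars row_text "(),")).toList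
  pvFields cs 0 (pvCuts 0 none false false false cs)

-- ===== PRECONDITION & SPEC =====
def Spec_parse_sql_row (row_text : String) (out : List String) : Prop := out = parse_sql_row_alt row_text
instance (row_text : String) (out : List String) : Decidable (Spec_parse_sql_row row_text out) := by unfold Spec_parse_sql_row; infer_instance

-- ===== CLAIM (what is proved, stated in full; the proofs are below) =====
def Claim_equal_parse_sql_row : Prop := ∀ (row_text : String), Dom_parse_sql_row row_text → Spec_parse_sql_row row_text (parse_sql_row row_text)

-- ===== LEMMAS AND PROOFS =====

-- extending A's accumulated field by one character = extending the slice by one position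
lemma pv_take_succ (cs : List Char) (start n : Nat) (c : Char) (ts : List Char)
    (hs : start ≤ n) (h : cs.drop n = c :: ts) :
    (cs.drop start).take (n - start) ++ [c] = (cs.drop start).take (n + 1 - start) := by
  have hn : n < cs.length := by
    by_contra hnot
    simp [List.drop_eq_nil_of_le (Nat.le_of_not_lt hnot)] at h
  have hget? : cs[n]? = some c := by
    have h0 := congrArg (fun l => l[0]?) h
    simpa [List.getElem?_drop] using h0
  have hget : cs[n]'hn = c := by
    rw [List.getElem?_eq_getElem hn] at hget?
    exact Option.some.inj hget?
  have hlt : n - start < (cs.drop start).length := by simp; omega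
  have hidx : (cs.drop start)[n - start]'hlt = c := by
    rw [List.getElem_drop]
    have : start + (n - start) = n := by omega
    simp_rw [this, hget]
  have heq : n + 1 - start = (n - start) + 1 := by omega
  rw [heq, List.take_add_one, List.getElem?_eq_getElem hlt, hidx]
  rfl

-- main invariant: A's loop state (fields, current_field) against B's two passes,
-- current_field being the slice of cs from the last cut (start) to the position n,
-- and B's previous-character register agreeing with A's index look-back
set_option maxHeartbeats 1000000 in
lemma pv_loop_rel (cs : List Char) :
    ∀ (ts : List Char) (n : Nat), cs.drop n = ts →
    ∀ (fields : List String) (start : Nat) (q ar esc : Bool) (prev : Option Char),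
    start ≤ n →
    prev = (if n = 0 then none else PySem.List.pyGet? cs ((n : Int) - 1)) →
    pvFinishA ((PySem.List.enumerate ts (n : Int)).foldl (pvStepA cs)
        (fields, (cs.drop start).take (n - start), q, ar, esc))
      = fields ++ pvFields cs (start : Int) (pvCuts (n : Int) prev q ar esc ts) := by
  intro ts
  induction ts with
  | nil =>
    intro n h fields start q ar esc prev hs hprev
    have hcur : (cs.drop start).take (n - start) = cs.drop start := by
      have hlen : cs.length ≤ n := by
        by_contra hnot
        have := List.drop_eq_nil_iff.mp h
        omega
      exact List.take_of_length_le (by simp; omega)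
    simp only [PySem.List.enumerate_nil, List.foldl_nil, pvCuts, pvFields, pvFinishA, hcur,
      PySem.List.slice_from_natCast]
    split_ifs <;> simp
  | cons c ts ih =>
    intro n h fields start q ar esc prev hs hprev
    have hn1 : cs.drop (n + 1) = ts := by
      rw [← List.drop_drop, h, List.drop_one, List.tail_cons]
    have hget? : cs[n]? = some c := by
      have h0 := congrArg (fun l => l[0]?) h
      simpa [List.getElem?_drop] using h0
    have hprev' : some c = (if n + 1 = 0 then none
        else PySem.List.pyGet? cs (((n + 1 : Nat) : Int) - 1)) := by
      have hm : ((n + 1 : Nat) : Int) - 1 = ((n : Nat) : Int) := by push_cast; ring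
      rw [hm]
      simp [PySem.List.pyGet?_natCast, hget?]
    have hcond : ((n : Int) = 0 ∨ PySem.List.pyGet? cs ((n : Int) - 1) ≠ some '\'')
        ↔ prev ≠ some '\'' := by
      rcases Nat.eq_zero_or_pos n with h0 | h0
      · subst h0; simp at hprev; simp [hprev]
      · rw [hprev]
        simp [Nat.pos_iff_ne_zero.mp h0]
    have hcast : (n : Int) + 1 = ((n + 1 : Nat) : Int) := by push_cast; ring
    rw [PySem.List.enumerate_cons, List.foldl_cons, hcast]
    simp only [pvStepA, pvCuts]
    have hcond' : (c = '\'' ∧ prev ≠ some '\'') ↔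
        (c = '\'' ∧ ((n : Int) = 0 ∨ PySem.List.pyGet? cs ((n : Int) - 1) ≠ some '\'')) :=
      and_congr_right fun _ => hcond.symm
    simp only [hcond']
    rw [hcast]
    split_ifs with h1 h2 h3 h4 h5 h6
    · rw [pv_take_succ cs start n c ts hs h]
      exact ih (n + 1) hn1 fields start q ar false (some c) (by omega) hprev'
    · rw [pv_take_succ cs start n c ts hs h]
      exact ih (n + 1) hn1 fields start q ar true (some c) (by omega) hprev'
    · rw [pv_take_succ cs start n c ts hs h]
      exact ih (n + 1) hn1 fields start (!q) ar esc (some c) (by omega) hprev'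
    · rw [pv_take_succ cs start n c ts hs h]
      exact ih (n + 1) hn1 fields start q true esc (some c) (by omega) hprev'
    · rw [pv_take_succ cs start n c ts hs h]
      exact ih (n + 1) hn1 fields start q false esc (some c) (by omega) hprev'
    · -- the comma branch: A closes the field, B records the cut position n
      simp only [pvFields]
      rw [show PySem.List.slice cs (some (start : Int)) (some (n : Int))
            = (cs.drop start).take (n - start) from PySem.List.slice_natCast cs start n]
      have hrec := ih (n + 1) hn1
        (fields ++ [String.ofList (PySem.Chars.strip ((cs.drop start).take (n - start)))])
        (n + 1) q ar esc (some c) (le_refl _) hprev'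
      simp only [Nat.sub_self, List.take_zero] at hrec
      rw [hrec, List.append_assoc]
      simp
    · rw [pv_take_succ cs start n c ts hs h]
      exact ih (n + 1) hn1 fields start q ar esc (some c) (by omega) hprev'

-- ===== VERDICT (by name: the statement is the Claim_ definition above) =====
theorem parse_sql_row_spec : Claim_equal_parse_sql_row := by
  intro row_text _
  unfold Spec_parse_sql_row parse_sql_row parse_sql_row_alt
  have h := pv_loop_rel ((PySem.Str.strip (PySem.Str.stripChars row_text "(),")).toList)
    ((PySem.Str.strip (PySem.Str.stripChars row_text "(),")).toList) 0
    List.drop_zero [] 0 false false false none (Nat.le_refl 0) (by simp)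
  simpa using h
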